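-- pv_equiv track=rewrite | github.com/ADiTyaRaj8969/Sliding_Windows | 9. K-sized Subarray with Equal 0s and 1s.py | exists_equal_zeros_ones
-- ===== SOURCE A (Python) =====
-- def exists_equal_zeros_ones(arr, k):
--     n = len(arr)
--     b = [ -1 if x==0 else 1 for x in arr ]
--     s = sum(b[:k])
--     if s==0: return True
--     for i in range(k, n):
--         s += b[i] - b[i-k]
--         if s==0: return True
--     return False
-- ===== SOURCE B (Python) =====
-- def exists_equal_zeros_ones(arr, k):
--     n = len(arr)
--     m = min(k, n)
--     P = [0]
--     for x in arr:
--         P.append(P[-1] + (-1 if x == 0 else 1))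
--     return any(P[i] == P[i + m] for i in range(n - m + 1))
-- ===== Notes on version B (the rewrite author's own statement) =====
-- stated objective: alternative
-- what changed: Replaces A's incremental sliding-window sum with early return by a precomputed prefix-sum table followed by a separate comparison pass (window balanced iff two prefix sums k apart are equal).
-- outside the precondition, e.g. on exists_equal_zeros_ones([1], -1): A returns True, B raises IndexError
import Mathlib
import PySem

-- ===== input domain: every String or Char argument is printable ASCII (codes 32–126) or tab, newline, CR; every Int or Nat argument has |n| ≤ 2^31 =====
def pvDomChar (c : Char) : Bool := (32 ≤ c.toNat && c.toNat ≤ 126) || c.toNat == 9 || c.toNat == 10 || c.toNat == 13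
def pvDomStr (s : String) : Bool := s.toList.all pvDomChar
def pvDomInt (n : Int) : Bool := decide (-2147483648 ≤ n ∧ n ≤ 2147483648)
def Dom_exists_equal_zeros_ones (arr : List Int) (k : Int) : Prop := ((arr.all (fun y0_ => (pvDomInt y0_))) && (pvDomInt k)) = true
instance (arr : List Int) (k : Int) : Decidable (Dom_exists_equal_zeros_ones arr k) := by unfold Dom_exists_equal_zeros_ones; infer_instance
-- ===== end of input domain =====

-- B replaces A's incremental sliding-window sum by a prefix-sum table plus a separate comparison pass (alternative decomposition, same cost).


-- ===== PORT A =====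
-- the 'for i in range(k, n): s += b[i] - b[i-k]; if s == 0: return True' loop of A
def pvALoop (b : List Int) (k : Int) (s : Int) : List Int → Bool
  | [] => false
  | i :: rest =>
      let s' := s + PySem.List.pyGetD b i 0 - PySem.List.pyGetD b (i - k) 0
      if s' == 0 then true else pvALoop b k s' rest

def exists_equal_zeros_ones (arr : List Int) (k : Int) : Bool :=
  let n : Int := arr.length
  let b := arr.map (fun x => if x == 0 then (-1 : Int) else 1)
  let s := (PySem.List.slice b none (some k)).sum
  if s == 0 then true
  else pvALoop b k s (PySem.List.pyRange k n 1)

-- ===== PORT B =====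
-- 'P = [0]; for x in arr: P.append(P[-1] + (-1 if x == 0 else 1))' as a running-sum recursion
def pvPrefix (s : Int) : List Int → List Int
  | [] => [s]
  | x :: xs => s :: pvPrefix (s + (if x == 0 then (-1 : Int) else 1)) xs

def exists_equal_zeros_ones_alt (arr : List Int) (k : Int) : Bool :=
  let n : Int := arr.length
  let m := min k n
  let P := pvPrefix 0 arr
  (PySem.List.pyRange 0 (n - m + 1) 1).any
    (fun i => PySem.List.pyGetD P i 0 == PySem.List.pyGetD P (i + m) 0)

-- ===== PRECONDITION & SPEC =====
-- Pre_ excludes negative window sizes k < 0, outside the function's natural domain: there A's value is an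
-- accident of slice truncation plus negative indexing (an IndexError on some inputs, an arbitrary shrunken
-- window on others), and B's prefix-sum pass may itself raise IndexError.
def Pre_exists_equal_zeros_ones (arr : List Int) (k : Int) : Prop := 0 ≤ k
instance (arr : List Int) (k : Int) : Decidable (Pre_exists_equal_zeros_ones arr k) := by unfold Pre_exists_equal_zeros_ones; infer_instance
def pvWitness_exists_equal_zeros_ones : List Int × Int := ([0, 1, 1, 0], 2)

def Spec_exists_equal_zeros_ones (arr : List Int) (k : Int) (out : Bool) : Prop := out = exists_equal_zeros_ones_alt arr k
instance (arr : List Int) (k : Int) (out : Bool) : Decidable (Spec_exists_equal_zeros_ones arr k out) := by unfold Spec_exists_equal_zeros_ones; infer_instance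

-- ===== CLAIM (what is proved, stated in full; the proofs are below) =====
def Claim_equal_exists_equal_zeros_ones : Prop := ∀ (arr : List Int) (k : Int), Dom_exists_equal_zeros_ones arr k → Pre_exists_equal_zeros_ones arr k → Spec_exists_equal_zeros_ones arr k (exists_equal_zeros_ones arr k)

-- ===== LEMMAS AND PROOFS =====

-- prefix sum of the ±1 mapping over the first j elements
def pvSf (arr : List Int) (j : Nat) : Int :=
  ((arr.take j).map (fun x => if x == 0 then (-1 : Int) else 1)).sum

theorem pvSf_succ (arr : List Int) (j : Nat) (h : j < arr.length) :
    pvSf arr (j + 1) = pvSf arr j + (if arr[j] == 0 then (-1 : Int) else 1) := by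
  unfold pvSf
  rw [List.take_add_one, List.getElem?_eq_getElem h, Option.toList_some, List.map_append,
    List.sum_append]
  simp

theorem pvSf_clamp (arr : List Int) (j : Nat) (h : arr.length ≤ j) :
    pvSf arr j = pvSf arr arr.length := by
  simp [pvSf, List.take_of_length_le h, List.take_length]

theorem pvPrefix_getD (arr : List Int) (s : Int) (j : Nat) (h : j ≤ arr.length) :
    (pvPrefix s arr).getD j 0 = s + pvSf arr j := by
  induction arr generalizing s j with
  | nil =>
      have hj0 : j = 0 := by simpa using h
      subst hj0; simp [pvPrefix, pvSf]
  | cons x xs ih =>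
      cases j with
      | zero => simp [pvPrefix, pvSf]
      | succ j =>
          have hj : j ≤ xs.length := by simpa using h
          simp only [pvPrefix, List.getD_cons_succ, ih _ _ hj, pvSf, List.take_succ_cons,
            List.map_cons, List.sum_cons]
          ring

theorem pvALoop_char (arr : List Int) (k : Int) (hk : 0 ≤ k)
    (c : Nat) : ∀ (j : Nat), k.toNat ≤ j → j + c = arr.length →
    pvALoop (arr.map (fun x => if x == 0 then (-1 : Int) else 1)) k
        (pvSf arr j - pvSf arr (j - k.toNat)) (PySem.List.pyRange (j : Int) (arr.length : Int) 1)
      = (List.range c).any (fun t => pvSf arr (j + 1 + t) == pvSf arr (j + 1 + t - k.toNat)) := by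
  induction c with
  | zero =>
      intro j hkj hj
      rw [PySem.List.pyRange_one_eq_nil (by omega)]
      simp [pvALoop]
  | succ c ih =>
      intro j hkj hj
      have hjlt : j < arr.length := by omega
      rw [PySem.List.pyRange_one_cons (by exact_mod_cast hjlt)]
      simp only [pvALoop]
      have hksub : (j : Int) - k = ((j - k.toNat : Nat) : Int) := by omega
      have h1 : PySem.List.pyGetD (arr.map (fun x => if x == 0 then (-1 : Int) else 1)) (j : Int) 0
          = (if arr[j] == 0 then (-1 : Int) else 1) := by
        rw [PySem.List.pyGetD_natCast]
        simp [List.getD, hjlt]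
      have hjk : j - k.toNat < arr.length := by omega
      have h2 : PySem.List.pyGetD (arr.map (fun x => if x == 0 then (-1 : Int) else 1)) ((j : Int) - k) 0
          = (if arr[j - k.toNat] == 0 then (-1 : Int) else 1) := by
        rw [hksub, PySem.List.pyGetD_natCast]
        simp [List.getD, hjk]
      rw [h1, h2]
      have hs' : pvSf arr j - pvSf arr (j - k.toNat) + (if arr[j] == 0 then (-1 : Int) else 1)
            - (if arr[j - k.toNat] == 0 then (-1 : Int) else 1)
          = pvSf arr (j + 1) - pvSf arr (j + 1 - k.toNat) := by
        rw [pvSf_succ arr j hjlt]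
        have : j + 1 - k.toNat = (j - k.toNat) + 1 := by omega
        rw [this, pvSf_succ arr _ hjk]
        ring
      rw [hs']
      have hcast : (j : Int) + 1 = ((j + 1 : Nat) : Int) := by omega
      rw [List.range_succ_eq_map]
      by_cases h0 : pvSf arr (j + 1) - pvSf arr (j + 1 - k.toNat) = 0
      · simp [sub_eq_zero.mp h0]
      · have hne : (pvSf arr (j + 1) - pvSf arr (j + 1 - k.toNat) == 0) = false := by
          simpa using h0
        rw [hne]
        simp only [Bool.false_eq_true, if_false, hcast]
        rw [ih (j + 1) (by omega) (by omega)]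
        have hrest : (pvSf arr (j + 1) == pvSf arr (j + 1 - k.toNat)) = false := by
          simp only [beq_eq_false_iff_ne, ne_eq]
          intro h; exact h0 (by omega)
        rw [List.any_cons, hrest, Bool.false_or, List.any_map]
        refine PySem.List.any_congr_mem (fun t _ => ?_)
        simp only [Function.comp_apply, Nat.succ_eq_add_one]
        rw [show j + 1 + 1 + t = j + 1 + (t + 1) from by omega]

theorem pv_main (arr : List Int) (k : Int) (hk : 0 ≤ k) :
    exists_equal_zeros_ones arr k = exists_equal_zeros_ones_alt arr k := by
  have hcomm : ∀ a b : Int, (a == b) = (b == a) := fun a b => by simp [eq_comm]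
  set n := arr.length with hn
  set K := k.toNat with hK
  set M := min K n with hM
  have hMn : M ≤ n := by omega
  -- B computes any i ∈ [0, n-M], P i = P (i+M)
  have hB : exists_equal_zeros_ones_alt arr k
      = (List.range (n - M + 1)).any (fun i => pvSf arr i == pvSf arr (i + M)) := by
    simp only [exists_equal_zeros_ones_alt]
    have hm : min k (n : Int) = (M : Int) := by omega
    have hcnt : (n : Int) - (M : Int) + 1 = ((n - M + 1 : Nat) : Int) := by omega
    rw [← hn, hm, hcnt, PySem.List.pyRange_zero_natCast, List.any_map]
    refine PySem.List.any_congr_mem (fun i hi => ?_)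
    have hin : i ≤ n - M := by
      have := List.mem_range.mp hi; omega
    have hiM : ((i : Int) + (M : Int)) = ((i + M : Nat) : Int) := by omega
    simp only [Function.comp_apply, hiM, PySem.List.pyGetD_natCast]
    rw [pvPrefix_getD arr 0 i (by omega), pvPrefix_getD arr 0 (i + M) (by omega)]
    simp
  -- A computes the same predicate
  have hA : exists_equal_zeros_ones arr k
      = (List.range (n - M + 1)).any (fun i => pvSf arr i == pvSf arr (i + M)) := by
    simp only [exists_equal_zeros_ones]
    have hslice : (PySem.List.slice (arr.map (fun x => if x == 0 then (-1 : Int) else 1)) none (some k)).sum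
        = pvSf arr K := by
      rw [PySem.List.slice_to _ hk, ← List.map_take, pvSf]
    rw [← hn, hslice]
    have hSf0 : pvSf arr 0 = 0 := by simp [pvSf]
    by_cases hbig : n ≤ K
    · -- k past the end: the for-loop range is empty, A tests the whole array
      have hMeq : M = n := by omega
      rw [PySem.List.pyRange_one_eq_nil (by omega), hMeq, pvSf_clamp arr K (by omega), ← hn]
      have hr1 : List.range (n - n + 1) = [0] := by simp
      simp only [hr1, List.any_cons, List.any_nil, hSf0, Nat.zero_add, Bool.or_false]
      rw [hcomm (pvSf arr n) 0]
      cases h : ((0 : Int) == pvSf arr n) <;> simp [pvALoop]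
    · -- 0 ≤ k ≤ n: the genuine sliding window
      have hMeq : M = K := by omega
      have hkK : k = (K : Int) := by omega
      have hloop := pvALoop_char arr k hk (n - K) K (le_refl _) (by omega)
      rw [Nat.sub_self, hSf0, sub_zero, ← hkK] at hloop
      rw [hloop, hMeq]
      have hsplit : n - K + 1 = (n - K) + 1 := rfl
      rw [hsplit, List.range_succ_eq_map, List.any_cons, List.any_map]
      rw [hSf0, Nat.zero_add, hcomm 0 (pvSf arr K)]
      cases h : (pvSf arr K == 0)
      · simp only [Bool.false_or, if_false, Bool.false_eq_true]
        refine PySem.List.any_congr_mem (fun t _ => ?_)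
        simp only [Function.comp_apply, Nat.succ_eq_add_one]
        rw [show K + 1 + t - K = t + 1 from by omega, show K + 1 + t = (t + 1) + K from by omega,
          hcomm]
      · simp
  rw [hA, hB]

-- ===== VERDICT (by name: the statement is the Claim_ definition above) =====
theorem exists_equal_zeros_ones_spec : Claim_equal_exists_equal_zeros_ones := by
  intro arr k _ hk
  exact pv_main arr k hk
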